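-- pv_equiv track=rewrite | github.com/amchp/CompetitivePrograming | Practice/addAndSumgame.py | count
-- ===== SOURCE A (Python) =====
-- def count(arr):
--     count = 0
--     odd = False
--     for x in arr:
--         if odd:
--             odd = False
--             continue
--         if x == 1:
--             count += 1
--             odd = True
--
--     return count
-- ===== SOURCE B (Python) =====
-- def count(arr):
--     # Two staged passes: collect the lengths of the maximal runs of consecutive
--     # 1s, then sum the closed form ceil(r/2) per run.  A skipped non-1 never
--     # affects anything, so within each run of r ones exactly every other one is
--     # counted: (r + 1) // 2.
--     runs = []
--     k = 0
--     for x in arr: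
--         if x == 1:
--             k += 1
--         else:
--             runs.append(k)
--             k = 0
--     runs.append(k)
--     return sum((r + 1) // 2 for r in runs)
-- ===== Notes on version B (the rewrite author's own statement) =====
-- stated objective: alternative
-- what changed: Replaces the stateful skip-flag scan by a two-stage run-length algorithm: first collect the lengths of the maximal runs of consecutive 1s, then sum the closed form (r+1)//2 per run (every other 1 in a run is counted; skipping a non-1 is a no-op).
import Mathlib
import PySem

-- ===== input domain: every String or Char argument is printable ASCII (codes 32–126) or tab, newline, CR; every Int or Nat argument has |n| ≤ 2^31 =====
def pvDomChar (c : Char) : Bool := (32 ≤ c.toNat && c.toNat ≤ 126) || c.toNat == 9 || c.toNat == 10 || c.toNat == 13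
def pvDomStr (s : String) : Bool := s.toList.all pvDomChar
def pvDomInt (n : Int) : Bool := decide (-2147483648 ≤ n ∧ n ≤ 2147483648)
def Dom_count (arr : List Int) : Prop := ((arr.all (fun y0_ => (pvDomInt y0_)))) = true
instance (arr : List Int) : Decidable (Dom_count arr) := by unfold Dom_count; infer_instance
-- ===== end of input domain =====

-- B replaces A's skip-flag scan by run lengths of consecutive 1s + closed form (r+1)//2 per run; return values proved equal.

-- ===== PORT A =====
-- for-loop over (count, odd) skip-flag state
def countStepA (s : Int × Bool) (x : Int) : Int × Bool :=
  if s.2 then (s.1, false)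
  else if x = 1 then (s.1 + 1, true)
  else (s.1, s.2)

def count (arr : List Int) : Int := (arr.foldl countStepA (0, false)).1

-- ===== PORT B =====
-- stage 1: lengths of maximal runs of consecutive 1s (runs list, current run k; runs.append(k) at the end)
def countStepB (s : List Int × Int) (x : Int) : List Int × Int :=
  if x = 1 then (s.1, s.2 + 1) else (s.1 ++ [s.2], 0)

-- stage 2: sum((r + 1) // 2 for r in runs)
def count_alt (arr : List Int) : Int :=
  ((arr.foldl countStepB ([], 0)).1 ++ [(arr.foldl countStepB ([], 0)).2]).foldl
    (fun acc r => acc + PySem.Int.floordiv (r + 1) 2) 0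

-- ===== PRECONDITION & SPEC =====
def Spec_count (arr : List Int) (out : Int) : Prop := out = count_alt arr
instance (arr : List Int) (out : Int) : Decidable (Spec_count arr out) := by unfold Spec_count; infer_instance

-- ===== CLAIM (what is proved, stated in full; the proofs are below) =====
def Claim_equal_count : Prop := ∀ (arr : List Int), Dom_count arr → Spec_count arr (count arr)

-- ===== LEMMAS AND PROOFS =====

-- the common value: result on the remaining list given the length k of the ongoing run of 1s
def countG : List Int → Nat → Int
  | [], k => (((k + 1) / 2 : Nat) : Int)
  | x :: t, k => if x = 1 then countG t (k + 1) else (((k + 1) / 2 : Nat) : Int) + countG t 0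

theorem countA_eq_G : ∀ (arr : List Int) (c : Int) (k : Nat),
    (arr.foldl countStepA (c, decide (k % 2 = 1))).1
      = c - (((k + 1) / 2 : Nat) : Int) + countG arr k := by
  intro arr
  induction arr with
  | nil => intro c k; simp [countG]
  | cons x t ih =>
    intro c k
    by_cases hk : k % 2 = 1
    · have h1 : (decide (k % 2 = 1)) = true := by simp [hk]
      by_cases hx : x = 1
      · -- flag set, current element (a 1) is skipped
        simp only [List.foldl_cons, countStepA, h1, countG, hx, if_true]
        rw [show (false : Bool) = decide ((k + 1) % 2 = 1) from (by simp; omega),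
          ih c (k + 1)]
        rw [show ((k + 1 + 1) / 2 : Nat) = ((k + 1) / 2 : Nat) from (by omega)]
      · -- flag set, non-1 skipped: run closes with no effect
        simp only [List.foldl_cons, countStepA, h1, countG, hx, if_true, if_false]
        rw [show (false : Bool) = decide ((0 : Nat) % 2 = 1) from (by simp),
          ih c 0]
        push_cast
        omega
    · have h1 : (decide (k % 2 = 1)) = false := by simp [hk]
      by_cases hx : x = 1
      · -- flag clear, a 1 is counted and sets the flag
        simp only [List.foldl_cons, countStepA, h1, Bool.false_eq_true, countG, hx,
          if_true, if_false]
        rw [show (true : Bool) = decide ((k + 1) % 2 = 1) from (by simp; omega),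
          ih (c + 1) (k + 1)]
        rw [show ((k + 1 + 1) / 2 : Nat) = ((k + 1) / 2 : Nat) + 1 from (by omega)]
        push_cast
        ring
      · -- flag clear, non-1: nothing happens, run closes
        simp only [List.foldl_cons, countStepA, h1, Bool.false_eq_true, countG, hx, if_false]
        rw [show (false : Bool) = decide ((0 : Nat) % 2 = 1) from (by simp),
          ih c 0]
        push_cast
        omega

theorem countB_eq_G : ∀ (arr : List Int) (rs : List Int) (k : Nat),
    (((arr.foldl countStepB (rs, (k : Int))).1 ++ [(arr.foldl countStepB (rs, (k : Int))).2]).foldl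
        (fun acc r => acc + PySem.Int.floordiv (r + 1) 2) 0)
      = (rs.foldl (fun acc r => acc + PySem.Int.floordiv (r + 1) 2) 0) + countG arr k := by
  intro arr
  induction arr with
  | nil =>
    intro rs k
    simp [List.foldl_append, countG]
  | cons x t ih =>
    intro rs k
    by_cases hx : x = 1
    · simp only [List.foldl_cons, countStepB, hx, if_true, countG]
      rw [show ((k : Int) + 1) = ((k + 1 : Nat) : Int) from (by push_cast; ring), ih rs (k + 1)]
    · simp only [List.foldl_cons, countStepB, hx, if_false, countG]
      have h0 := ih (rs ++ [(k : Int)]) 0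
      simp only [Nat.cast_zero] at h0
      rw [h0, List.foldl_append]
      simp
      ring

-- ===== VERDICT (by name: the statement is the Claim_ definition above) =====
theorem count_spec : Claim_equal_count := by
  intro arr _
  unfold Spec_count count count_alt
  have hA := countA_eq_G arr 0 0
  have hB := countB_eq_G arr [] 0
  simp only [show decide ((0 : Nat) % 2 = 1) = false from rfl, Nat.cast_zero,
    Nat.reduceDiv, List.foldl_nil, zero_add, sub_zero] at hA hB
  rw [hA, ← hB]
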